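-- pv_equiv track=rewrite | github.com/North-Broward-Preparatory-School/unit-3-group-project-chess-game | moves2.py | checkingrooks
-- ===== SOURCE A (Python) =====
-- def checkingrooks (chessboard, x, y, x4, y4):
--     for i in range (-7,7):
--         if chessboard [x4] [y4] ==0:
--             if x-i==x4 and y==y4:
--                 return True
--             elif x+i==x4 and y==y4:
--                 return True
--             elif x==x4 and y-i==y4:
--                 return True
--             elif x==x4 and y+i==y4:
--                 return True
--     return False
-- ===== SOURCE B (Python) =====
-- def checkingrooks(chessboard, x, y, x4, y4):
--     # index first so the same IndexError is raised as in A
--     return chessboard[x4][y4] == 0 and (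
--         (y == y4 and abs(x - x4) <= 7) or (x == x4 and abs(y - y4) <= 7)
--     )
-- ===== Notes on version B (the rewrite author's own statement) =====
-- stated objective: simpler
-- what changed: Replaces the 14-iteration offset loop with a single closed-form boolean: target square empty and same row/column within an inclusive distance of 7.
import Mathlib
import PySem

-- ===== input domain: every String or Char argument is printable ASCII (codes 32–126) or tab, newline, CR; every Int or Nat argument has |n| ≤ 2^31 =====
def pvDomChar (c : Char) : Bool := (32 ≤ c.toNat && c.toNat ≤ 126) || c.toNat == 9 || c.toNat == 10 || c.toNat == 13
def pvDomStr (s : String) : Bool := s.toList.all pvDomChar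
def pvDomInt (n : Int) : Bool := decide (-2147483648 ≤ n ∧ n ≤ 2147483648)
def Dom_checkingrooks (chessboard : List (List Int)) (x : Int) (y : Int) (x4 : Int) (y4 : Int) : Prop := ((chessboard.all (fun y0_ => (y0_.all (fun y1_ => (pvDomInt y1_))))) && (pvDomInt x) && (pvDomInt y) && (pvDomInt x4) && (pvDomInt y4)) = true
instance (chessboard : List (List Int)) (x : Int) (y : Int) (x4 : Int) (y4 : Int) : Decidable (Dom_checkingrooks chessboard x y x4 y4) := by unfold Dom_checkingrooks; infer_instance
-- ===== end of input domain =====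

-- B replaces A's 14-iteration offset loop with a single closed-form boolean (same-row/column within
-- inclusive distance 7 and target square empty); equivalence is about the return value only.

-- ===== PORT A =====
-- chessboard[x4][y4] (none = IndexError, excluded by Pre_)
def pvCell (chessboard : List (List Int)) (x4 : Int) (y4 : Int) : Option Int :=
  (PySem.List.pyGet? chessboard x4).bind (fun row => PySem.List.pyGet? row y4)

-- the 'for i in range(-7,7)' loop with its early returns
def pvLoopA (chessboard : List (List Int)) (x y x4 y4 : Int) : List Int → Bool
  | [] => false
  | i :: rest =>
    match pvCell chessboard x4 y4 with
    | none => false   -- Python raises IndexError here (outside Pre_)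
    | some v =>
      if v = 0 then
        if x - i = x4 ∧ y = y4 then true
        else if x + i = x4 ∧ y = y4 then true
        else if x = x4 ∧ y - i = y4 then true
        else if x = x4 ∧ y + i = y4 then true
        else pvLoopA chessboard x y x4 y4 rest
      else pvLoopA chessboard x y x4 y4 rest

def checkingrooks (chessboard : List (List Int)) (x : Int) (y : Int) (x4 : Int) (y4 : Int) : Bool :=
  pvLoopA chessboard x y x4 y4 (PySem.List.pyRange (-7) 7 1)

-- ===== PORT B =====
def checkingrooks_alt (chessboard : List (List Int)) (x : Int) (y : Int) (x4 : Int) (y4 : Int) : Bool :=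
  match pvCell chessboard x4 y4 with
  | none => false   -- Python raises IndexError here (outside Pre_)
  | some v =>
    decide (v = 0) &&
      ((decide (y = y4) && decide (|x - x4| ≤ 7)) || (decide (x = x4) && decide (|y - y4| ≤ 7)))

-- ===== PRECONDITION & SPEC =====
-- Pre_: the double index chessboard[x4][y4] is in range (both Pythons raise IndexError otherwise)
def Pre_checkingrooks (chessboard : List (List Int)) (x : Int) (y : Int) (x4 : Int) (y4 : Int) : Prop :=
  PySem.Raise.InRange chessboard.length x4 ∧
    ∀ row, PySem.List.pyGet? chessboard x4 = some row → PySem.Raise.InRange row.length y4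
instance (chessboard : List (List Int)) (x : Int) (y : Int) (x4 : Int) (y4 : Int) : Decidable (Pre_checkingrooks chessboard x y x4 y4) := by unfold Pre_checkingrooks; infer_instance

def pvWitness_checkingrooks : List (List Int) × Int × Int × Int × Int := ([[0, 1], [1, 0]], 0, 0, 0, 1)

def Spec_checkingrooks (chessboard : List (List Int)) (x : Int) (y : Int) (x4 : Int) (y4 : Int) (out : Bool) : Prop := out = checkingrooks_alt chessboard x y x4 y4
instance (chessboard : List (List Int)) (x : Int) (y : Int) (x4 : Int) (y4 : Int) (out : Bool) : Decidable (Spec_checkingrooks chessboard x y x4 y4 out) := by unfold Spec_checkingrooks; infer_instance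

-- ===== CLAIM (what is proved, stated in full; the proofs are below) =====
def Claim_equal_checkingrooks : Prop := ∀ (chessboard : List (List Int)) (x : Int) (y : Int) (x4 : Int) (y4 : Int), Dom_checkingrooks chessboard x y x4 y4 → Pre_checkingrooks chessboard x y x4 y4 → Spec_checkingrooks chessboard x y x4 y4 (checkingrooks chessboard x y x4 y4)

-- ===== LEMMAS AND PROOFS =====

-- the loop is 'cell empty AND some offset in the list hits'
theorem pvLoopA_char (chessboard : List (List Int)) (x y x4 y4 : Int) (l : List Int) :
    pvLoopA chessboard x y x4 y4 l =
      ((pvCell chessboard x4 y4 == some 0) &&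
        l.any (fun i =>
          decide (x - i = x4 ∧ y = y4) || decide (x + i = x4 ∧ y = y4) ||
          decide (x = x4 ∧ y - i = y4) || decide (x = x4 ∧ y + i = y4))) := by
  induction l with
  | nil => simp [pvLoopA]
  | cons i rest ih =>
    rw [pvLoopA]
    cases h : pvCell chessboard x4 y4 with
    | none => simp
    | some v =>
      rw [ih, h]
      by_cases hv : v = 0
      · subst hv
        split_ifs with h1 h2 h3 h4 <;> simp_all
      · have hb : (some v == some (0 : Int)) = false := by simp [hv]
        simp [hv, hb]

-- ===== VERDICT (by name: the statement is the Claim_ definition above) =====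
theorem checkingrooks_spec : Claim_equal_checkingrooks := by
  intro chessboard x y x4 y4 _ _
  unfold Spec_checkingrooks checkingrooks checkingrooks_alt
  rw [pvLoopA_char]
  cases h : pvCell chessboard x4 y4 with
  | none => simp
  | some v =>
    by_cases hv : v = 0
    · subst hv
      have hb : (some (0 : Int) == some 0) = true := rfl
      rw [hb, Bool.true_and]
      rw [Bool.eq_iff_iff]
      simp only [List.any_eq_true, PySem.List.mem_pyRange_one, decide_eq_true_eq,
        Bool.or_eq_true, Bool.and_eq_true, decide_true, Bool.true_and, abs_le]
      constructor
      · rintro ⟨i, ⟨h1, h2⟩, hhit⟩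
        omega
      · rintro (⟨hy, h1, h2⟩ | ⟨hx, h1, h2⟩)
        · by_cases hc : x - x4 ≤ 6
          · exact ⟨x - x4, ⟨by omega, by omega⟩, by omega⟩
          · exact ⟨x4 - x, ⟨by omega, by omega⟩, by omega⟩
        · by_cases hc : y - y4 ≤ 6
          · exact ⟨y - y4, ⟨by omega, by omega⟩, by omega⟩
          · exact ⟨y4 - y, ⟨by omega, by omega⟩, by omega⟩
    · have hb : (some v == some (0 : Int)) = false := by simp [hv]
      rw [hb]
      simp [hv]
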